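-- pv_equiv track=rewrite | github.com/evanking12/mcp-factory | scripts/demo_script_capabilities.py | majority_confidence
-- ===== SOURCE A (Python) =====
-- import collections
--
-- class C:
--     HEADER    = "\033[95m"
--     BLUE      = "\033[94m"
--     CYAN      = "\033[96m"
--     GREEN     = "\033[92m"
--     YELLOW    = "\033[93m"
--     RED       = "\033[91m"
--     ENDC      = "\033[0m"
--     BOLD      = "\033[1m"
--
-- def majority_confidence(invocables: list) -> tuple[str, str]:
--     """Return (label, colour) for the dominant confidence tier."""
--     if not invocables:
--         return "NONE", C.RED
--
--     counts = collections.Counter(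
--         inv.get("confidence", "low").lower() for inv in invocables
--     )
--     total = len(invocables)
--
--     guaranteed = counts.get("guaranteed", 0)
--     high       = counts.get("high",       0)
--
--     if guaranteed / total > 0.5:
--         return "GUARANTEED", C.GREEN
--     if (guaranteed + high) / total > 0.5:
--         return "HIGH",       C.CYAN
--     if (guaranteed + high + counts.get("medium", 0)) / total > 0.5:
--         return "MEDIUM",     C.YELLOW
--     return "LOW", C.RED
-- ===== SOURCE B (Python) =====
-- class C:
--     HEADER    = "\033[95m"
--     BLUE      = "\033[94m"
--     CYAN      = "\033[96m"
--     GREEN     = "\033[92m"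
--     YELLOW    = "\033[93m"
--     RED       = "\033[91m"
--     ENDC      = "\033[0m"
--     BOLD      = "\033[1m"
--
-- _RANK = {"guaranteed": 0, "high": 1, "medium": 2}
-- _TIERS = [("GUARANTEED", C.GREEN), ("HIGH", C.CYAN),
--           ("MEDIUM", C.YELLOW), ("LOW", C.RED)]
--
-- def majority_confidence(invocables: list) -> tuple[str, str]:
--     """Return (label, colour) for the dominant confidence tier.
--
--     Sort-and-select: the first tier whose cumulative share strictly exceeds
--     one half is exactly the tier of the median element (index n//2) of the
--     ranks sorted best-to-worst, so we sort and index instead of counting."""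
--     if not invocables:
--         return "NONE", C.RED
--     ranks = sorted(_RANK.get(inv.get("confidence", "low").lower(), 3)
--                    for inv in invocables)
--     return _TIERS[ranks[len(ranks) // 2]]
-- ===== Notes on version B (the rewrite author's own statement) =====
-- stated objective: alternative
-- what changed: B replaces counting per tier plus cumulative-threshold branches with a sort-and-select algorithm: it maps each invocable to a numeric rank, sorts the ranks and returns the tier of the median element at index n//2, which coincides with the first tier whose cumulative share strictly exceeds one half.
import Mathlib
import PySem

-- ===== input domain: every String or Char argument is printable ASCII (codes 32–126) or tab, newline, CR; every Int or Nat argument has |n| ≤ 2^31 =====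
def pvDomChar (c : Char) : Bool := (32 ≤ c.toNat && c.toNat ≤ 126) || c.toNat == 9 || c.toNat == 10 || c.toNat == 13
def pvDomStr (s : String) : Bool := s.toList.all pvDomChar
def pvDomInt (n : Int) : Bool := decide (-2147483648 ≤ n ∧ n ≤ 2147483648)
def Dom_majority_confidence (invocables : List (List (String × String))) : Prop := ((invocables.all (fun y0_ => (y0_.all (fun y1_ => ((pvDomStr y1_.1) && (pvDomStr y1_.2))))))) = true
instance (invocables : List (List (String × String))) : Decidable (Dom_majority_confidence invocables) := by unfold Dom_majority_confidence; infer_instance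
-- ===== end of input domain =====

-- B replaces A's per-tier counting with cumulative-threshold branches by a
-- sort-and-select algorithm: sort the numeric ranks and return the tier of the median
-- element at index n//2 (alternative algorithm, same result).

-- ===== PORT A =====
-- the colour constants of class C used by the function
def pvC_CYAN : String := "\x1b[96m"
def pvC_GREEN : String := "\x1b[92m"
def pvC_YELLOW : String := "\x1b[93m"
def pvC_RED : String := "\x1b[91m"

-- inv.get("confidence", "low").lower()
def pvConfOf (inv : List (String × String)) : String :=
  PySem.Str.lower (PySem.Dict.getD (PySem.Dict.mk inv) "confidence" "low")

-- Port of A. The float comparisons 'x / total > 0.5' are ported as '2 * x > total',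
-- which is exact here (total > 0 and the counts are small nonnegative integers).
def majority_confidence (invocables : List (List (String × String))) : String × String :=
  if invocables = [] then ("NONE", pvC_RED)
  else
    let counts : PySem.Dict String Int := PySem.Dict.counter (invocables.map pvConfOf)
    let total : Int := invocables.length
    let guaranteed : Int := counts.getD "guaranteed" 0
    let high : Int := counts.getD "high" 0
    if 2 * guaranteed > total then ("GUARANTEED", pvC_GREEN)
    else if 2 * (guaranteed + high) > total then ("HIGH", pvC_CYAN)
    else if 2 * (guaranteed + high + counts.getD "medium" 0) > total then ("MEDIUM", pvC_YELLOW)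
    else ("LOW", pvC_RED)

-- ===== PORT B =====
-- _RANK.get(conf, 3): the numeric rank of a confidence string
def pvRank (inv : List (String × String)) : Nat :=
  let c := pvConfOf inv
  if c = "guaranteed" then 0
  else if c = "high" then 1
  else if c = "medium" then 2
  else 3

-- _TIERS[r]
def pvTier (r : Nat) : String × String :=
  if r = 0 then ("GUARANTEED", pvC_GREEN)
  else if r = 1 then ("HIGH", pvC_CYAN)
  else if r = 2 then ("MEDIUM", pvC_YELLOW)
  else ("LOW", pvC_RED)

-- Port of B: sort the ranks and index the median. 'ranks[len(ranks)//2]' is always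
-- in range on a nonempty list; ported with getD (the default is never used).
def majority_confidence_alt (invocables : List (List (String × String))) : String × String :=
  if invocables = [] then ("NONE", pvC_RED)
  else
    let ranks := PySem.List.sorted (invocables.map pvRank) (fun x => x) false
    pvTier (ranks.getD (invocables.length / 2) 3)

-- ===== PRECONDITION & SPEC =====
def Spec_majority_confidence (invocables : List (List (String × String))) (out : String × String) : Prop := out = majority_confidence_alt invocables
instance (invocables : List (List (String × String))) (out : String × String) : Decidable (Spec_majority_confidence invocables out) := by unfold Spec_majority_confidence; infer_instance

-- ===== CLAIM =====
def Claim_equal_majority_confidence : Prop := ∀ (invocables : List (List (String × String))), Dom_majority_confidence invocables → Spec_majority_confidence invocables (majority_confidence invocables)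

-- ===== LEMMAS AND PROOFS =====

-- the sorted rank list is the counts laid out in order
theorem pvSorted_ranks (rs : List Nat) (hmem : ∀ x ∈ rs, x ≤ 3) :
    PySem.List.sorted rs (fun x => x) false =
      List.replicate (rs.count 0) 0 ++ List.replicate (rs.count 1) 1 ++
      List.replicate (rs.count 2) 2 ++ List.replicate (rs.count 3) 3 := by
  apply PySem.List.sorted_id_eq_of_perm_of_pairwise
  · rw [List.perm_iff_count]
    intro a
    by_cases hm' : a ∈ rs
    · have := hmem a hm'
      interval_cases a <;> simp [List.count_append, List.count_replicate]
    · have h0 := List.count_eq_zero.mpr hm'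
      simp only [List.count_append, List.count_replicate, h0]
      split_ifs <;> simp_all
  · -- pairwise ≤ on the concatenation of replicates
    simp [List.pairwise_append, List.pairwise_replicate, List.mem_replicate]
    omega

-- indexing the laid-out counts
theorem pvGetD_layout (g h m lo k : Nat) :
    (List.replicate g 0 ++ List.replicate h 1 ++
      List.replicate m 2 ++ List.replicate lo 3 : List Nat).getD k 3 =
      if k < g then 0 else if k < g + h then 1 else if k < g + h + m then 2 else 3 := by
  simp only [List.getD_eq_getElem?_getD, List.getElem?_append, List.length_append,
    List.length_replicate, List.getElem?_replicate]
  split_ifs <;> simp_all <;> omega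

-- string counts of the lowered labels are rank counts
theorem pvCount_rank (l : List (List (String × String))) :
    ((l.map pvConfOf).count "guaranteed" = (l.map pvRank).count 0) ∧
    ((l.map pvConfOf).count "high" = (l.map pvRank).count 1) ∧
    ((l.map pvConfOf).count "medium" = (l.map pvRank).count 2) := by
  induction l with
  | nil => simp
  | cons x xs ih =>
    simp only [List.map_cons, List.count_cons, pvRank]
    by_cases hg : pvConfOf x = "guaranteed"
    · simp [hg, ih.1, ih.2.1, ih.2.2]
    · by_cases hh : pvConfOf x = "high"
      · simp [hh, ih.1, ih.2.1, ih.2.2]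
      · by_cases hm : pvConfOf x = "medium"
        · simp [hm, ih.1, ih.2.1, ih.2.2]
        · simp [hg, hh, hm, ih.1, ih.2.1, ih.2.2]

-- all elements are ≤ 3, so the four counts exhaust the list
theorem pvCount_sum (rs : List Nat) (hmem : ∀ x ∈ rs, x ≤ 3) :
    rs.count 0 + rs.count 1 + rs.count 2 + rs.count 3 = rs.length := by
  induction rs with
  | nil => simp
  | cons x xs ih =>
    have hx := hmem x List.mem_cons_self
    have ihx := ih (fun y hy => hmem y (List.mem_cons_of_mem x hy))
    simp only [List.count_cons, List.length_cons]
    interval_cases x <;> simp <;> omega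

-- ===== VERDICT =====
theorem majority_confidence_spec : Claim_equal_majority_confidence := by
  intro invocables _
  unfold Spec_majority_confidence majority_confidence majority_confidence_alt
  by_cases hnil : invocables = []
  · simp [hnil]
  · simp only [hnil, if_false]
    have hne : invocables.length ≠ 0 := by simpa [List.length_eq_zero_iff] using hnil
    set rs := invocables.map pvRank with hrs
    have hb : ∀ x ∈ rs, x ≤ 3 := by
      intro x hx
      obtain ⟨i, _, rfl⟩ := List.mem_map.mp hx
      simp only [pvRank]; split_ifs <;> omega
    rw [pvSorted_ranks rs hb, pvGetD_layout]
    have hcnt := pvCount_rank invocables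
    rw [PySem.Dict.getD_counter, PySem.Dict.getD_counter, PySem.Dict.getD_counter,
      hcnt.1, hcnt.2.1, hcnt.2.2]
    have hn : rs.length = invocables.length := by simp [hrs]
    have hsum : rs.count 0 + rs.count 1 + rs.count 2 + rs.count 3 = rs.length :=
      pvCount_sum rs hb
    set g := rs.count 0; set h := rs.count 1; set m := rs.count 2
    set k := invocables.length / 2
    unfold pvTier
    split_ifs <;> first | rfl | (exfalso; omega)
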